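-- pv_equiv track=rewrite | github.com/Tsabitah07/Algoritma | code/latihan_12.py | devided_conquer_min_search
-- ===== SOURCE A (Python) =====
-- def devided_conquer_min_search(arr, left, right):
--     if left == right:
--         return arr[left], 0
--
--     mid = (left + right) // 2
--
--     min_left, comps_left = devided_conquer_min_search(arr, left, mid)
--     min_right, comps_right = devided_conquer_min_search(arr, mid + 1, right)
--
--     total_comps = comps_left + comps_right + 1
--
--     if min_left < min_right:
--         return min_left, total_comps
--     else:
--         return min_right, total_comps
-- ===== SOURCE B (Python) =====
-- def devided_conquer_min_search(arr, left, right):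
--     m = arr[left]
--     comps = 0
--     for i in range(left + 1, right + 1):
--         comps += 1
--         if arr[i] < m:
--             m = arr[i]
--     return m, comps
-- ===== Notes on version B (the rewrite author's own statement) =====
-- stated objective: simpler
-- what changed: Replaces the divide-and-conquer recursion with a single left-to-right scan keeping a running minimum and a counter; the comparison count equals right-left in both.
import Mathlib
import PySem

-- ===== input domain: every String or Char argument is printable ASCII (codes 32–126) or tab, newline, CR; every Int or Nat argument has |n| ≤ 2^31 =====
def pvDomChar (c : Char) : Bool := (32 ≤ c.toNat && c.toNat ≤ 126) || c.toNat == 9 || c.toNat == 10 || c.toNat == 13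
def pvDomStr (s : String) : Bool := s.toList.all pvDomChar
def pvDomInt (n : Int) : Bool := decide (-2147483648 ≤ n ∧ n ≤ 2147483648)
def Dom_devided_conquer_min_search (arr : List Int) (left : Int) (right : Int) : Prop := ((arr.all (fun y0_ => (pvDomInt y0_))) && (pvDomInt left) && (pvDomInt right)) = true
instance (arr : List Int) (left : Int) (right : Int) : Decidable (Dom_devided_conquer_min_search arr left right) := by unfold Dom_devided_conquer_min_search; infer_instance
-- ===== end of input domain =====

-- B replaces A's divide-and-conquer recursion with a single left-to-right scan
-- (running minimum + counter); equivalence of the RETURN values is proved on Pre_.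

-- ===== PORT A =====
-- fuel makes the Python recursion total in Lean; fuel never runs out on Pre_
-- (recursion depth ≤ right-left+1), and outside Pre_ Python A raises/diverges.
def dcGo (arr : List Int) (fuel : Nat) (left right : Int) : Int × Int :=
  match fuel with
  | 0 => (0, 0)
  | fuel + 1 =>
    if left = right then (PySem.List.pyGetD arr left 0, 0)   -- arr[left]; in range on Pre_
    else
      let mid := PySem.Int.floordiv (left + right) 2
      let pl := dcGo arr fuel left mid
      let pr := dcGo arr fuel (mid + 1) right
      let total_comps := pl.2 + pr.2 + 1
      if pl.1 < pr.1 then (pl.1, total_comps) else (pr.1, total_comps)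

def devided_conquer_min_search (arr : List Int) (left : Int) (right : Int) : Int × Int :=
  dcGo arr ((right - left).toNat + 1) left right

-- ===== PORT B =====
def devided_conquer_min_search_alt (arr : List Int) (left : Int) (right : Int) : Int × Int :=
  (PySem.List.pyRange (left + 1) (right + 1) 1).foldl
    (fun st i =>
      (if PySem.List.pyGetD arr i 0 < st.1 then PySem.List.pyGetD arr i 0 else st.1,
       st.2 + 1))
    (PySem.List.pyGetD arr left 0, 0)

-- ===== PRECONDITION & SPEC =====
-- Pre_: left ≤ right (on left > right A recurses forever) and every index of
-- the segment is a valid Python index of arr (negative indices wrap); outside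
-- that A raises IndexError/RecursionError.
def Pre_devided_conquer_min_search (arr : List Int) (left : Int) (right : Int) : Prop :=
  left ≤ right ∧ -(arr.length : Int) ≤ left ∧ right < (arr.length : Int)
instance (arr : List Int) (left : Int) (right : Int) : Decidable (Pre_devided_conquer_min_search arr left right) := by unfold Pre_devided_conquer_min_search; infer_instance

def pvWitness_devided_conquer_min_search : List Int × Int × Int := ([3, 1, 2], 0, 2)

def Spec_devided_conquer_min_search (arr : List Int) (left : Int) (right : Int) (out : Int × Int) : Prop := out = devided_conquer_min_search_alt arr left right
instance (arr : List Int) (left : Int) (right : Int) (out : Int × Int) : Decidable (Spec_devided_conquer_min_search arr left right out) := by unfold Spec_devided_conquer_min_search; infer_instance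

-- ===== CLAIM (what is proved, stated in full; the proofs are below) =====
def Claim_equal_devided_conquer_min_search : Prop := ∀ (arr : List Int) (left : Int) (right : Int), Dom_devided_conquer_min_search arr left right → Pre_devided_conquer_min_search arr left right → Spec_devided_conquer_min_search arr left right (devided_conquer_min_search arr left right)

-- ===== LEMMAS AND PROOFS =====

-- the minimum of the segment, as B's scan computes it (values only)
def segMin (arr : List Int) (l r : Int) : Int :=
  (PySem.List.pyRange (l + 1) (r + 1) 1).foldl
    (fun m i => min m (PySem.List.pyGetD arr i 0)) (PySem.List.pyGetD arr l 0)

lemma foldl_pair_min_count (arr : List Int) (L : List Int) (a c : Int) :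
    L.foldl (fun st i =>
      (if PySem.List.pyGetD arr i 0 < st.1 then PySem.List.pyGetD arr i 0 else st.1,
       st.2 + 1)) (a, c)
    = (L.foldl (fun m i => min m (PySem.List.pyGetD arr i 0)) a, c + (L.length : Int)) := by
  induction L generalizing a c with
  | nil => simp
  | cons x L ih =>
    simp only [List.foldl_cons, List.length_cons, ih]
    have hmin : (if PySem.List.pyGetD arr x 0 < a then PySem.List.pyGetD arr x 0 else a)
        = min a (PySem.List.pyGetD arr x 0) := by
      rw [min_def]; split_ifs <;> omega
    rw [hmin]
    refine Prod.ext rfl ?_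
    push_cast; ring

lemma foldl_min_shift (L : List Int) (f : Int → Int) (a b : Int) :
    L.foldl (fun m i => min m (f i)) (min a b) = min a (L.foldl (fun m i => min m (f i)) b) := by
  induction L generalizing b with
  | nil => rfl
  | cons x L ih => simpa [min_assoc] using ih (min b (f x))

lemma segMin_self (arr : List Int) (l : Int) :
    segMin arr l l = PySem.List.pyGetD arr l 0 := by
  simp [segMin, PySem.List.pyRange_one_eq_nil (by omega : l + 1 ≤ l + 1)]

lemma segMin_split (arr : List Int) (l m r : Int) (h1 : l ≤ m) (h2 : m < r) :
    segMin arr l r = min (segMin arr l m) (segMin arr (m + 1) r) := by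
  unfold segMin
  rw [PySem.List.pyRange_one_append (l + 1) (m + 1) (r + 1) (by omega) (by omega),
      List.foldl_append,
      PySem.List.pyRange_one_cons (by omega : m + 1 < r + 1)]
  simp only [List.foldl_cons]
  rw [foldl_min_shift]

lemma dcGo_eq (arr : List Int) (fuel : Nat) :
    ∀ l r : Int, l ≤ r → (r - l).toNat < fuel →
      dcGo arr fuel l r = (segMin arr l r, r - l) := by
  induction fuel with
  | zero => intro l r _ h; omega
  | succ n ih =>
    intro l r hlr hfuel
    by_cases he : l = r
    · subst he
      simp [dcGo, segMin_self]
    · have hlt : l < r := lt_of_le_of_ne hlr he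
      have hmid := PySem.Int.floordiv_two_mid_bounds hlr
      set mid := PySem.Int.floordiv (l + r) 2 with hmiddef
      have hmlt : mid < r := by
        rw [hmiddef, PySem.Int.floordiv_lt_iff_lt_mul (by omega : (0:Int) < 2)]
        omega
      have h1 : dcGo arr n l mid = (segMin arr l mid, mid - l) :=
        ih l mid hmid.1 (by omega)
      have h2 : dcGo arr n (mid + 1) r = (segMin arr (mid + 1) r, r - (mid + 1)) :=
        ih (mid + 1) r (by omega) (by omega)
      have hsplit := segMin_split arr l mid r hmid.1 hmlt
      simp only [dcGo, if_neg he, ← hmiddef, h1, h2, hsplit]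
      split_ifs with h
      · exact Prod.ext (min_eq_left (le_of_lt h)).symm (by omega)
      · exact Prod.ext (min_eq_right (le_of_not_gt h)).symm (by omega)

lemma alt_eq (arr : List Int) (l r : Int) (hlr : l ≤ r) :
    devided_conquer_min_search_alt arr l r = (segMin arr l r, r - l) := by
  unfold devided_conquer_min_search_alt
  rw [foldl_pair_min_count]
  refine Prod.ext rfl ?_
  simp [PySem.List.length_pyRange_one]
  omega

-- ===== VERDICT (by name: the statement is the Claim_ definition above) =====
theorem devided_conquer_min_search_spec : Claim_equal_devided_conquer_min_search := by
  intro arr left right _ hpre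
  obtain ⟨hlr, _, _⟩ := hpre
  unfold Spec_devided_conquer_min_search devided_conquer_min_search
  rw [alt_eq arr left right hlr, dcGo_eq arr _ left right hlr (by omega)]
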